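-- pv_equiv track=rewrite | github.com/Zain-Waheed/CV-System | app.py | extract_education_level
-- ===== SOURCE A (Python) =====
-- def extract_education_level(text):
--     """Extract education level from CV"""
--     education_levels = {
--         'phd': ['ph.d', 'phd', 'doctorate', 'doctoral'],
--         'masters': ['master', 'mba', 'ms', 'ma', 'msc', 'm.s', 'm.a'],
--         'bachelors': ['bachelor', 'bs', 'ba', 'bsc', 'b.s', 'b.a', 'undergraduate'],
--         'associates': ['associate', 'aa', 'as', 'a.a', 'a.s'],
--         'diploma': ['diploma', 'certificate', 'certification'],
--         'high_school': ['high school', 'secondary', 'matriculation']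
--     }
--
--     text_lower = text.lower()
--     found_levels = []
--
--     for level, keywords in education_levels.items():
--         if any(keyword in text_lower for keyword in keywords):
--             found_levels.append(level)
--
--     # Return highest level found
--     level_hierarchy = ['phd', 'masters', 'bachelors', 'associates', 'diploma', 'high_school']
--     for level in level_hierarchy:
--         if level in found_levels:
--             return level
--
--     return 'not_specified'
-- ===== SOURCE B (Python) =====
-- def extract_education_level(text):
--     """Extract education level from CV"""
--     education_levels = {
--         'phd': ['ph.d', 'phd', 'doctorate', 'doctoral'],
--         'masters': ['master', 'mba', 'ms', 'ma', 'msc', 'm.s', 'm.a'],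
--         'bachelors': ['bachelor', 'bs', 'ba', 'bsc', 'b.s', 'b.a', 'undergraduate'],
--         'associates': ['associate', 'aa', 'as', 'a.a', 'a.s'],
--         'diploma': ['diploma', 'certificate', 'certification'],
--         'high_school': ['high school', 'secondary', 'matriculation']
--     }
--
--     text_lower = text.lower()
--     for level in ['phd', 'masters', 'bachelors', 'associates', 'diploma', 'high_school']:
--         if any(keyword in text_lower for keyword in education_levels[level]):
--             return level
--     return 'not_specified'
-- ===== Notes on version B (the rewrite author's own statement) =====
-- stated objective: simpler
-- what changed: Drops the intermediate found_levels list and its second pass: B walks the priority hierarchy once and returns the first level whose keywords occur in the lowered text.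
import Mathlib
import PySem

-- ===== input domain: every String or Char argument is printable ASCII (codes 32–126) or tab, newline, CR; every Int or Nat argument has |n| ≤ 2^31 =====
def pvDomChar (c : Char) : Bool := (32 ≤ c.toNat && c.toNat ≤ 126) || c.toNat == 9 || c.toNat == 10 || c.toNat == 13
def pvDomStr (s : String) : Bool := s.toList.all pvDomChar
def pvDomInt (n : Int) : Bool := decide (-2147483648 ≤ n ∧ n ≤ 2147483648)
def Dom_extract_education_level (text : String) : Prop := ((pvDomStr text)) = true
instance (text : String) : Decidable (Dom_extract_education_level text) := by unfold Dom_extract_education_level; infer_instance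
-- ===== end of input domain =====

-- B drops A's intermediate found_levels list and second pass: one priority-ordered scan with early return (objective: simpler).

-- the keyword dictionary, byte-identical in both programs (Python dict → association list in insertion order)
def eduLevels : List (String × List String) :=
  [("phd", ["ph.d", "phd", "doctorate", "doctoral"]),
   ("masters", ["master", "mba", "ms", "ma", "msc", "m.s", "m.a"]),
   ("bachelors", ["bachelor", "bs", "ba", "bsc", "b.s", "b.a", "undergraduate"]),
   ("associates", ["associate", "aa", "as", "a.a", "a.s"]),
   ("diploma", ["diploma", "certificate", "certification"]),
   ("high_school", ["high school", "secondary", "matriculation"])]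

-- ===== PORT A =====
def extract_education_level (text : String) : String :=
  let text_lower := PySem.Str.lower text
  let found_levels : List String := eduLevels.foldl (fun acc p =>
      if p.2.any (fun keyword => PySem.Str.isIn keyword text_lower) then acc ++ [p.1] else acc) []
  let level_hierarchy := ["phd", "masters", "bachelors", "associates", "diploma", "high_school"]
  match level_hierarchy.find? (fun level => found_levels.contains level) with
  | some level => level
  | none => "not_specified"

-- ===== PORT B =====
-- B's dict (same literal content as A's)
def eduDict : PySem.Dict String (List String) := PySem.Dict.ofList eduLevels

-- B's loop over the hierarchy with early return, as structural recursion
def eduScan (text_lower : String) : List String → String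
  | [] => "not_specified"
  | level :: rest =>
      if ((eduDict.getD level []).any (fun keyword => PySem.Str.isIn keyword text_lower)) then
        level
      else eduScan text_lower rest

def extract_education_level_alt (text : String) : String :=
  eduScan (PySem.Str.lower text) ["phd", "masters", "bachelors", "associates", "diploma", "high_school"]

-- ===== PRECONDITION & SPEC =====
def Spec_extract_education_level (text : String) (out : String) : Prop := out = extract_education_level_alt text
instance (text : String) (out : String) : Decidable (Spec_extract_education_level text out) := by unfold Spec_extract_education_level; infer_instance

-- ===== CLAIM (what is proved, stated in full; the proofs are below) =====
def Claim_equal_extract_education_level : Prop := ∀ (text : String), Dom_extract_education_level text → Spec_extract_education_level text (extract_education_level text)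

-- ===== LEMMAS AND PROOFS =====
theorem eq_all (text : String) : extract_education_level text = extract_education_level_alt text := by
  unfold extract_education_level extract_education_level_alt
  generalize PySem.Str.lower text = tl
  have e1 : eduDict.getD "phd" [] = ["ph.d", "phd", "doctorate", "doctoral"] := by decide
  have e2 : eduDict.getD "masters" [] = ["master", "mba", "ms", "ma", "msc", "m.s", "m.a"] := by decide
  have e3 : eduDict.getD "bachelors" [] = ["bachelor", "bs", "ba", "bsc", "b.s", "b.a", "undergraduate"] := by decide
  have e4 : eduDict.getD "associates" [] = ["associate", "aa", "as", "a.a", "a.s"] := by decide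
  have e5 : eduDict.getD "diploma" [] = ["diploma", "certificate", "certification"] := by decide
  have e6 : eduDict.getD "high_school" [] = ["high school", "secondary", "matriculation"] := by decide
  simp only [eduLevels, eduScan, List.foldl, e1, e2, e3, e4, e5, e6]
  generalize (["ph.d", "phd", "doctorate", "doctoral"].any (fun keyword => PySem.Str.isIn keyword tl)) = b1
  generalize (["master", "mba", "ms", "ma", "msc", "m.s", "m.a"].any (fun keyword => PySem.Str.isIn keyword tl)) = b2
  generalize (["bachelor", "bs", "ba", "bsc", "b.s", "b.a", "undergraduate"].any (fun keyword => PySem.Str.isIn keyword tl)) = b3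
  generalize (["associate", "aa", "as", "a.a", "a.s"].any (fun keyword => PySem.Str.isIn keyword tl)) = b4
  generalize (["diploma", "certificate", "certification"].any (fun keyword => PySem.Str.isIn keyword tl)) = b5
  generalize (["high school", "secondary", "matriculation"].any (fun keyword => PySem.Str.isIn keyword tl)) = b6
  cases b1 <;> cases b2 <;> cases b3 <;> cases b4 <;> cases b5 <;> cases b6 <;> rfl

-- ===== VERDICT (by name: the statement is the Claim_ definition above) =====
theorem extract_education_level_spec : Claim_equal_extract_education_level := by
  intro text _
  unfold Spec_extract_education_level
  exact eq_all text
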